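-- pv_equiv track=rewrite | github.com/senuuw/VLMVision | classifyvideo.py | create_segment_blocks
-- ===== SOURCE A (Python) =====
-- def create_segment_blocks(segment_dict):
--     segment_block_dict = {}
--
--     for category in segment_dict.keys():
--         current_segment_list = segment_dict[category]
--         segment_block_dict[category] = []
--
--         # Initialize the first segment
--         segment_response = current_segment_list[0][0]
--         segment_start_time = current_segment_list[0][1]
--         segment_end_time = current_segment_list[0][2]
--
--         for i in range(len(current_segment_list) - 1):
--             next_response = current_segment_list[i + 1][0]
--             next_start_time = current_segment_list[i + 1][1]
--             next_end_time = current_segment_list[i + 1][2]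
--
--             if segment_response != next_response:
--                 if segment_end_time >= next_start_time:
--                     # Split the overlap
--                     mid_time = (segment_end_time + next_start_time) // 2
--                     segment_block_dict[category].append([segment_response, segment_start_time, mid_time])
--                     segment_response = next_response
--                     segment_start_time = mid_time + 1
--                     segment_end_time = next_end_time
--                 else:
--                     segment_block_dict[category].append([segment_response, segment_start_time, segment_end_time])
--                     segment_response = next_response
--                     segment_start_time = next_start_time
--                     segment_end_time = next_end_time
--             else:
--                 segment_end_time = next_end_time
--
--         # Append the last segment
--         segment_block_dict[category].append([segment_response, segment_start_time, segment_end_time])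
--
--     return segment_block_dict
-- ===== SOURCE B (Python) =====
-- def _group_runs(segs):
--     # first pass: maximal runs of consecutive equal responses -> merged blocks
--     runs = [[segs[0][0], segs[0][1], segs[0][2]]]
--     for seg in segs[1:]:
--         if seg[0] == runs[-1][0]:
--             runs[-1][2] = seg[2]
--         else:
--             runs.append([seg[0], seg[1], seg[2]])
--     return runs
--
--
-- def _split_overlaps(runs):
--     # second pass: resolve overlaps between adjacent blocks
--     for i in range(len(runs) - 1):
--         if runs[i][2] >= runs[i + 1][1]:
--             mid = (runs[i][2] + runs[i + 1][1]) // 2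
--             runs[i][2] = mid
--             runs[i + 1][1] = mid + 1
--     return runs
--
--
-- def create_segment_blocks(segment_dict):
--     return {category: _split_overlaps(_group_runs(segs))
--             for category, segs in segment_dict.items()}
-- ===== Notes on version B (the rewrite author's own statement) =====
-- stated objective: alternative
-- what changed: A's single stateful loop that interleaves run-merging and overlap-splitting is decomposed into two independent passes per category: first group maximal runs of consecutive equal responses into merged blocks, then split overlaps between adjacent blocks pairwise; the result dict is built by a comprehension.
import Mathlib
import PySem

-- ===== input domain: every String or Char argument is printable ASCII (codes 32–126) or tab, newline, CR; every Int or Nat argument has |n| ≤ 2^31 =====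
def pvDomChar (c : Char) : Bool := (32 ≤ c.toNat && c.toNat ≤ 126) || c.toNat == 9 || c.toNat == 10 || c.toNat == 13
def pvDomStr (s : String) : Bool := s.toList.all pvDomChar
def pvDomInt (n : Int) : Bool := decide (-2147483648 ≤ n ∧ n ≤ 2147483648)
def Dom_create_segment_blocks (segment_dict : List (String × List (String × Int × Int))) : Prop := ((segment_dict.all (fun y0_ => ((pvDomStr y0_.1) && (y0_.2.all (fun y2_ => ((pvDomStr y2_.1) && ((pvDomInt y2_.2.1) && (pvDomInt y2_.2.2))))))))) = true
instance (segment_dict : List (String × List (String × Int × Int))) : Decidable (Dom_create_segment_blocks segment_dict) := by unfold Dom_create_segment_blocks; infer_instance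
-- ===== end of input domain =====

-- B re-decomposes A's single stateful merge-and-split loop into two passes (group maximal
-- equal-response runs, then split overlaps between adjacent blocks); alternative, same cost.

-- ===== PORT A =====
-- one step of A's inner loop; state = (blocks appended so far, segment_response, segment_start_time, segment_end_time)
def pvStepA (st : List (String × Int × Int) × String × Int × Int) (nxt : String × Int × Int) :
    List (String × Int × Int) × String × Int × Int :=
  match st, nxt with
  | (acc, r, s, e), (nr, ns, ne) =>
    if r ≠ nr then
      if e ≥ ns then
        let mid := PySem.Int.floordiv (e + ns) 2
        (acc ++ [(r, s, mid)], nr, mid + 1, ne)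
      else
        (acc ++ [(r, s, e)], nr, ns, ne)
    else
      (acc, r, s, ne)

-- A's body for one category's list; Python raises IndexError on [] (excluded by Pre_)
def pvBlocksA (l : List (String × Int × Int)) : List (String × Int × Int) :=
  match l with
  | [] => []
  | x :: rest =>
    let st := rest.foldl pvStepA ([], x.1, x.2.1, x.2.2)
    st.1 ++ [(st.2.1, st.2.2.1, st.2.2.2)]

def create_segment_blocks (segment_dict : List (String × List (String × Int × Int))) : List (String × List (String × Int × Int)) :=
  ((PySem.Dict.keys (PySem.Dict.mk segment_dict)).foldl
    (fun out cat =>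
      PySem.Dict.insert out cat (pvBlocksA (PySem.Dict.getD (PySem.Dict.mk segment_dict) cat [])))
    PySem.Dict.empty).items

-- ===== PORT B =====
-- first pass (_group_runs): current run carried as (r, s, e); emitted when the response changes
def pvRuns (r : String) (s e : Int) (l : List (String × Int × Int)) : List (String × Int × Int) :=
  match l with
  | [] => [(r, s, e)]
  | (nr, ns, ne) :: t => if nr = r then pvRuns r s ne t else (r, s, e) :: pvRuns nr ns ne t

-- second pass (_split_overlaps): each step finalises runs[i] and passes the updated runs[i+1] on
def pvAdjust : List (String × Int × Int) → List (String × Int × Int)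
  | [] => []
  | [a] => [a]
  | a :: b :: t =>
    if a.2.2 ≥ b.2.1 then
      let mid := PySem.Int.floordiv (a.2.2 + b.2.1) 2
      (a.1, a.2.1, mid) :: pvAdjust ((b.1, mid + 1, b.2.2) :: t)
    else
      a :: pvAdjust (b :: t)
termination_by l => l.length

def pvBlocksB (l : List (String × Int × Int)) : List (String × Int × Int) :=
  match l with
  | [] => []  -- Python B raises IndexError here too (excluded by Pre_)
  | (r, s, e) :: t => pvAdjust (pvRuns r s e t)

def create_segment_blocks_alt (segment_dict : List (String × List (String × Int × Int))) : List (String × List (String × Int × Int)) :=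
  segment_dict.map (fun kv => (kv.1, pvBlocksB kv.2))

-- ===== PRECONDITION & SPEC =====
-- Pre_ excludes categories with an empty segment list (A and B both raise IndexError there) and
-- assoc lists with duplicate keys (not a valid Python dict; A could never receive such an input).
def Pre_create_segment_blocks (segment_dict : List (String × List (String × Int × Int))) : Prop :=
  (segment_dict.map Prod.fst).Nodup ∧ ∀ kv ∈ segment_dict, kv.2 ≠ []
instance (segment_dict : List (String × List (String × Int × Int))) : Decidable (Pre_create_segment_blocks segment_dict) := by unfold Pre_create_segment_blocks; infer_instance

def pvWitness_create_segment_blocks : (List (String × List (String × Int × Int))) :=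
  [("person", [("yes", 0, 5), ("yes", 6, 9), ("no", 8, 12)]), ("car", [("no", 1, 3)])]

def Spec_create_segment_blocks (segment_dict : List (String × List (String × Int × Int))) (out : List (String × List (String × Int × Int))) : Prop := out = create_segment_blocks_alt segment_dict
instance (segment_dict : List (String × List (String × Int × Int))) (out : List (String × List (String × Int × Int))) : Decidable (Spec_create_segment_blocks segment_dict out) := by unfold Spec_create_segment_blocks; infer_instance

-- ===== CLAIM =====
def Claim_equal_create_segment_blocks : Prop := ∀ (segment_dict : List (String × List (String × Int × Int))), Dom_create_segment_blocks segment_dict → Pre_create_segment_blocks segment_dict → Spec_create_segment_blocks segment_dict (create_segment_blocks segment_dict)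

-- ===== LEMMAS AND PROOFS =====

-- pvRuns only passes the start s through into the head block
lemma pvRuns_shape (t : List (String × Int × Int)) : ∀ (r : String) (e : Int),
    ∃ E tl, ∀ s, pvRuns r s e t = (r, s, E) :: tl := by
  induction t with
  | nil => intro r e; exact ⟨e, [], fun s => rfl⟩
  | cons x t ih =>
    intro r e
    obtain ⟨nr, ns, ne⟩ := x
    by_cases h : nr = r
    · obtain ⟨E, tl, hs⟩ := ih r ne
      exact ⟨E, tl, fun s => by simp [pvRuns, h, hs s]⟩
    · exact ⟨e, pvRuns nr ns ne t, fun s => by simp [pvRuns, h]⟩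

-- "append the last segment": proof-side abbreviation for A's loop-exit step
def pvFinish (st : List (String × Int × Int) × String × Int × Int) : List (String × Int × Int) :=
  st.1 ++ [(st.2.1, st.2.2.1, st.2.2.2)]

-- A's inner loop equals: group from the current run, then split overlaps
lemma loopA_eq (rest : List (String × Int × Int)) :
    ∀ (acc : List (String × Int × Int)) (r : String) (s e : Int),
    pvFinish (rest.foldl pvStepA (acc, r, s, e)) = acc ++ pvAdjust (pvRuns r s e rest) := by
  induction rest with
  | nil => intro acc r s e; simp [pvFinish, pvRuns, pvAdjust]
  | cons x t ih =>
    intro acc r s e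
    obtain ⟨nr, ns, ne⟩ := x
    by_cases hr : r = nr
    · subst hr
      have hstep : pvStepA (acc, r, s, e) (r, ns, ne) = (acc, r, s, ne) := by simp [pvStepA]
      rw [List.foldl_cons, hstep, ih]
      simp [pvRuns]
    · obtain ⟨E, tl, hs⟩ := pvRuns_shape t nr ne
      by_cases he : e ≥ ns
      · have hstep : pvStepA (acc, r, s, e) (nr, ns, ne) =
            (acc ++ [(r, s, PySem.Int.floordiv (e + ns) 2)], nr,
              PySem.Int.floordiv (e + ns) 2 + 1, ne) := by
          simp [pvStepA, hr, he]
        rw [List.foldl_cons, hstep, ih]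
        rw [pvRuns, if_neg (fun h => hr h.symm), hs ns, hs (PySem.Int.floordiv (e + ns) 2 + 1)]
        simp [pvAdjust, he, List.append_assoc]
      · have hstep : pvStepA (acc, r, s, e) (nr, ns, ne) = (acc ++ [(r, s, e)], nr, ns, ne) := by
          simp [pvStepA, hr, he]
        rw [List.foldl_cons, hstep, ih]
        rw [pvRuns, if_neg (fun h => hr h.symm), hs ns]
        simp [pvAdjust, he, List.append_assoc]

lemma blocksA_eq_blocksB (l : List (String × Int × Int)) : pvBlocksA l = pvBlocksB l := by
  cases l with
  | nil => rfl
  | cons x rest =>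
    obtain ⟨r, s, e⟩ := x
    simpa [pvBlocksA, pvBlocksB, pvFinish] using loopA_eq rest [] r s e

-- ===== VERDICT =====
theorem create_segment_blocks_spec : Claim_equal_create_segment_blocks := by
  intro sd _hdom hpre
  obtain ⟨hnd, -⟩ := hpre
  unfold Spec_create_segment_blocks create_segment_blocks create_segment_blocks_alt
  have hkeys : (PySem.Dict.mk sd).keys = sd.map Prod.fst := by
    simp [PySem.Dict.keys]
  rw [hkeys]
  have hfold := PySem.Dict.items_foldl_insert_fresh (List.map Prod.fst sd) (fun a => a)
      (fun cat => pvBlocksA ((PySem.Dict.mk sd).getD cat [])) PySem.Dict.empty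
      (fun a _ => PySem.Dict.contains_empty a) (by simpa using hnd)
  rw [hfold]
  simp only [PySem.Dict.empty, List.map_map, List.nil_append]
  refine List.map_congr_left ?_
  intro kv hkv
  have hget : (PySem.Dict.mk sd).getD kv.1 [] = kv.2 := by
    apply PySem.Dict.getD_of_mem_items
    · simpa [PySem.Dict.items] using hkv
    · simpa [hkeys] using hnd
  simp [Function.comp, hget, blocksA_eq_blocksB]
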